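-- pv_equiv track=rewrite | github.com/LeeJaichenco/myAPI | main.py | generate_key_frames_with_characters
-- ===== SOURCE A (Python) =====
-- def generate_key_frames_with_characters(key_frames, character_descriptions):
--     """
--     Generate key frames from the story and add relevant character descriptions to each frame.
--     :param key_frames: List of key frames generated from the story.
--     :param character_descriptions: Dictionary of character names to descriptions.
--     :param n: Number of key frames to generate.
--     :return: List of key frames with character descriptions.
--     """
--     frames_with_characters = []
--     for frame in key_frames:
--         # Process each frame to find mentioned characters and add their descriptions
--         frame_description = frame
--         for character, description in character_descriptions.items():
--             if character in frame:
--                 frame_description += f" {character} Description: {description}"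
--
--         frames_with_characters.append(frame_description)
--
--     return frames_with_characters
-- ===== SOURCE B (Python) =====
-- def generate_key_frames_with_characters(key_frames, character_descriptions):
--     # Character-major traversal: for each character, record its description
--     # suffix against every frame that mentions it, then join per frame.
--     additions = [[] for _ in key_frames]
--     for character, description in character_descriptions.items():
--         suffix = f" {character} Description: {description}"
--         for i, frame in enumerate(key_frames):
--             if character in frame:
--                 additions[i].append(suffix)
--     return [frame + "".join(adds) for frame, adds in zip(key_frames, additions)]
-- ===== Notes on version B (the rewrite author's own statement) =====
-- stated objective: alternative
-- what changed: Inverted the loop nesting: B traverses character-major, accumulating per-frame lists of ready-made description suffixes, and produces each output line by a single join instead of A's frame-major repeated string concatenation.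
import Mathlib
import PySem

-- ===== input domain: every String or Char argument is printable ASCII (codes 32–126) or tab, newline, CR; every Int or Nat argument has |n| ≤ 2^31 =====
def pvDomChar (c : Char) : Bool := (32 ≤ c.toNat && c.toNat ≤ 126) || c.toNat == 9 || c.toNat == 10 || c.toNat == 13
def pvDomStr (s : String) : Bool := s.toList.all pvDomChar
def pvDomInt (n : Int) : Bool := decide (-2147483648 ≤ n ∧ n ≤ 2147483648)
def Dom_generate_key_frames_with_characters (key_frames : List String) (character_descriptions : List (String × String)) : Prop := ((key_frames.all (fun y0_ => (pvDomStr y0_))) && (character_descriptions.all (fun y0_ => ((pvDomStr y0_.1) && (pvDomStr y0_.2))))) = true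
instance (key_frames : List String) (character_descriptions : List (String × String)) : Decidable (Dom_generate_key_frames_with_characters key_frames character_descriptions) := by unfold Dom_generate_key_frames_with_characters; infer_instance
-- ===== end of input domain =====

-- B inverts A's loop nesting (character-major accumulation of suffix lists, one join per frame); alternative structure, same cost.
-- ===== PORT A =====
def generate_key_frames_with_characters (key_frames : List String) (character_descriptions : List (String × String)) : List String :=
  key_frames.foldl
    (fun frames_with_characters frame =>
      let frame_description :=
        character_descriptions.foldl
          (fun frame_description cd =>
            if PySem.Str.isIn cd.1 frame then
              frame_description ++ " " ++ cd.1 ++ " Description: " ++ cd.2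
            else frame_description)
          frame
      frames_with_characters ++ [frame_description])
    []

-- ===== PORT B =====
def generate_key_frames_with_characters_alt (key_frames : List String) (character_descriptions : List (String × String)) : List String :=
  let additions :=
    character_descriptions.foldl
      (fun additions cd =>
        let suffix := " " ++ cd.1 ++ " Description: " ++ cd.2
        (key_frames.zip additions).map
          (fun fa => if PySem.Str.isIn cd.1 fa.1 then fa.2 ++ [suffix] else fa.2))
      (key_frames.map (fun _ => ([] : List String)))
  (key_frames.zip additions).map (fun fa => fa.1 ++ PySem.Str.join "" fa.2)

-- ===== PRECONDITION & SPEC =====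
def Spec_generate_key_frames_with_characters (key_frames : List String) (character_descriptions : List (String × String)) (out : List String) : Prop := out = generate_key_frames_with_characters_alt key_frames character_descriptions
instance (key_frames : List String) (character_descriptions : List (String × String)) (out : List String) : Decidable (Spec_generate_key_frames_with_characters key_frames character_descriptions out) := by unfold Spec_generate_key_frames_with_characters; infer_instance

-- ===== CLAIM (what is proved, stated in full; the proofs are below) =====
def Claim_equal_generate_key_frames_with_characters : Prop := ∀ (key_frames : List String) (character_descriptions : List (String × String)), Dom_generate_key_frames_with_characters key_frames character_descriptions → Spec_generate_key_frames_with_characters key_frames character_descriptions (generate_key_frames_with_characters key_frames character_descriptions)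


-- ===== LEMMAS AND PROOFS =====
theorem pvStrExt {s t : String} (h : s.toList = t.toList) : s = t :=
  String.ext (by simpa [String.toList] using h)

theorem pvJoin0_nil : PySem.Str.join "" ([] : List String) = "" := by
  apply pvStrExt; simp [PySem.Str.toList_join, PySem.Chars.join_nil]

theorem pvJoin0_cons (s : String) (l : List String) :
    PySem.Str.join "" (s :: l) = s ++ PySem.Str.join "" l := by
  apply pvStrExt
  cases l with
  | nil => simp [PySem.Str.toList_join, PySem.Chars.join_singleton, PySem.Chars.join_nil]
  | cons b t => simp [PySem.Str.toList_join, PySem.Chars.join_cons_cons]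

theorem pvInnerA (frame : String) (cds : List (String × String)) : ∀ acc : String,
    cds.foldl (fun fd cd => if PySem.Str.isIn cd.1 frame then fd ++ " " ++ cd.1 ++ " Description: " ++ cd.2 else fd) acc
      = acc ++ PySem.Str.join "" ((cds.filter (fun cd => PySem.Str.isIn cd.1 frame)).map
          (fun cd => " " ++ cd.1 ++ " Description: " ++ cd.2)) := by
  induction cds with
  | nil => intro acc; simp [pvJoin0_nil]
  | cons cd t ih =>
      intro acc
      simp only [List.foldl_cons, List.filter_cons]
      cases h : PySem.Str.isIn cd.1 frame with
      | false => simp only [Bool.false_eq_true, if_false, ih]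
      | true =>
          simp only [if_true, ih, List.map_cons, pvJoin0_cons]
          simp [String.append_assoc]

theorem pvFoldB (kf : List String) (cds : List (String × String)) : ∀ g : String → List String,
    cds.foldl (fun additions cd =>
        (kf.zip additions).map
          (fun fa => if PySem.Str.isIn cd.1 fa.1 then fa.2 ++ [" " ++ cd.1 ++ " Description: " ++ cd.2] else fa.2))
      (kf.map g)
      = kf.map (fun f => g f ++ (cds.filter (fun cd => PySem.Str.isIn cd.1 f)).map
          (fun cd => " " ++ cd.1 ++ " Description: " ++ cd.2)) := by
  induction cds with
  | nil => intro g; simp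
  | cons cd t ih =>
      intro g
      have hzip : kf.zip (kf.map g) = kf.map (fun x => (x, g x)) := by
        simpa using (@List.zip_map' _ _ _ id g kf)
      simp only [List.foldl_cons, hzip, List.map_map, Function.comp_def]
      rw [ih (fun f => if PySem.Str.isIn cd.1 f then g f ++ [" " ++ cd.1 ++ " Description: " ++ cd.2] else g f)]
      apply List.map_congr_left
      intro f _
      cases h : PySem.Chars.isIn cd.1.toList f.toList with
      | false => simp [h]
      | true => simp [h]

-- ===== VERDICT (by name: the statement is the Claim_ definition above) =====
theorem generate_key_frames_with_characters_spec : Claim_equal_generate_key_frames_with_characters := by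
  intro kf cds _
  unfold Spec_generate_key_frames_with_characters
  unfold generate_key_frames_with_characters generate_key_frames_with_characters_alt
  have hzip : ∀ g : String → List String, kf.zip (kf.map g) = kf.map (fun x => (x, g x)) := by
    intro g; simpa using (@List.zip_map' _ _ _ id g kf)
  simp only [PySem.List.foldl_append_singleton_eq_map, List.nil_append,
    pvFoldB kf cds (fun _ => ([] : List String)), List.nil_append, hzip, List.map_map,
    Function.comp_def]
  apply List.map_congr_left
  intro frame _
  rw [pvInnerA frame cds frame]
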